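-- pv_equiv track=rewrite | github.com/v21sobral/96230Senai-logica | 8.Arrays/exerc_numposneg.py | positivos_negativos
-- ===== SOURCE A (Python) =====
-- def positivos_negativos(lista):
--     positivo = 0
--     negativo = 0
--     neutro = 0
--     for numero in lista:
--         if numero == 0:
--             neutro += 1
--         elif numero < 0:
--             negativo += 1
--         elif numero > 0:
--             positivo += numero  # Soma os números positivos
--     return negativo, positivo, neutro
-- ===== SOURCE B (Python) =====
-- def positivos_negativos(lista):
--     negativo = sum(1 for x in lista if x < 0)
--     positivo = sum(x for x in lista if x > 0)
--     neutro = sum(1 for x in lista if x == 0)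
--     return negativo, positivo, neutro
-- ===== Notes on version B (the rewrite author's own statement) =====
-- stated objective: alternative
-- what changed: Replaces the single accumulator loop with three separate generator-expression aggregations (a filtered count of negatives, a filtered sum of positives, a filtered count of zeros).
import Mathlib
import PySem

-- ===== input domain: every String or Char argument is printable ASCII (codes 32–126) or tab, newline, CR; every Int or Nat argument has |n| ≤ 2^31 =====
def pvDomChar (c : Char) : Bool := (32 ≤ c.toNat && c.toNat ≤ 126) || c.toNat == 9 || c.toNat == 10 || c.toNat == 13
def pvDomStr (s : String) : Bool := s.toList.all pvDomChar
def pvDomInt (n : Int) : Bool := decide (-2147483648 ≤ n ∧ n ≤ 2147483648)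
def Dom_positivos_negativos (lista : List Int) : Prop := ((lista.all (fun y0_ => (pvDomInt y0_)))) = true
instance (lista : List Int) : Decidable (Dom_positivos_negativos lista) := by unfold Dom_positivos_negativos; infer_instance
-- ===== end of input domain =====

-- B replaces A's single accumulator loop with three separate filtered aggregations (count negatives, sum positives, count zeros); objective: alternative decomposition, same O(n) cost.


-- ===== PORT A =====
-- loop body of A, lifted to a named helper (a literal transcription of A's if/elif chain)
def pnBody (acc : Int × Int × Int) (numero : Int) : Int × Int × Int :=
  let (positivo, negativo, neutro) := acc
  if numero == 0 then (positivo, negativo, neutro + 1)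
  else if numero < 0 then (positivo, negativo + 1, neutro)
  else if numero > 0 then (positivo + numero, negativo, neutro)
  else (positivo, negativo, neutro)

def positivos_negativos (lista : List Int) : Int × Int × Int :=
  let st := lista.foldl pnBody (0, 0, 0)
  (st.2.1, st.1, st.2.2)

-- ===== PORT B =====
def positivos_negativos_alt (lista : List Int) : Int × Int × Int :=
  let negativo := ((lista.filter (fun x => x < 0)).map (fun _ => (1 : Int))).sum
  let positivo := (lista.filter (fun x => x > 0)).sum
  let neutro := ((lista.filter (fun x => x == 0)).map (fun _ => (1 : Int))).sum
  (negativo, positivo, neutro)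

-- ===== PRECONDITION & SPEC =====
def Spec_positivos_negativos (lista : List Int) (out : Int × Int × Int) : Prop := out = positivos_negativos_alt lista
instance (lista : List Int) (out : Int × Int × Int) : Decidable (Spec_positivos_negativos lista out) := by unfold Spec_positivos_negativos; infer_instance

-- ===== CLAIM (what is proved, stated in full; the proofs are below) =====
def Claim_equal_positivos_negativos : Prop := ∀ (lista : List Int), Dom_positivos_negativos lista → Spec_positivos_negativos lista (positivos_negativos lista)

-- ===== LEMMAS AND PROOFS =====

-- ===== VERDICT (by name: the statement is the Claim_ definition above) =====
lemma pn_foldl_char (lista : List Int) (p n z : Int) :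
    lista.foldl pnBody (p, n, z)
    = (p + (lista.filter (fun x => x > 0)).sum,
       n + ((lista.filter (fun x => x < 0)).map (fun _ => (1 : Int))).sum,
       z + ((lista.filter (fun x => x == 0)).map (fun _ => (1 : Int))).sum) := by
  induction lista generalizing p n z with
  | nil => simp
  | cons a t ih =>
    rw [List.foldl_cons]
    by_cases h0 : a = 0
    · have hb : pnBody (p, n, z) a = (p, n, z + 1) := by
        simp [pnBody, h0]
      rw [hb, ih]
      simp [h0]
      ring
    · by_cases hn : a < 0
      · have hb : pnBody (p, n, z) a = (p, n + 1, z) := by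
          simp [pnBody, h0, hn]
        rw [hb, ih]
        have hp : ¬ a > 0 := by omega
        simp [h0, hn, hp]
        ring
      · have hp : a > 0 := by omega
        have hb : pnBody (p, n, z) a = (p + a, n, z) := by
          simp [pnBody, h0, hn, hp]
        rw [hb, ih]
        simp [h0, hn, hp]
        ring

theorem positivos_negativos_spec : Claim_equal_positivos_negativos := by
  intro lista _
  unfold Spec_positivos_negativos positivos_negativos positivos_negativos_alt
  simp only [pn_foldl_char]
  simp
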